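-- pv_equiv track=rewrite | github.com/pypi-data/pypi-mirror-381 | packages/gitlab-pipeline-analyzer/gitlab_pipeline_analyzer-0.13.0.tar.gz/gitlab_pipeline_analyzer-0.13.0/src/gitlab_analyzer/mcp/services/error_analysis_service.py | filter_errors_by_mode
-- ===== SOURCE A (Python) =====
-- from typing import Any
--
-- def filter_errors_by_mode(
--     errors: list[dict[str, Any]], mode: str = "balanced"
-- ) -> list[dict[str, Any]]:
--     """
--     Filter and prioritize errors based on analysis mode.
--
--     Args:
--         errors: List of error dictionaries
--         mode: Analysis mode (minimal, balanced, fixing, detailed)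
--
--     Returns:
--         Filtered and prioritized errors
--     """
--     if mode == "minimal":
--         # Only return critical errors for minimal mode
--         return [
--             error
--             for error in errors
--             if error.get("severity", "error") in ["error", "critical"]
--         ]
--
--     elif mode == "balanced":
--         # Return all errors but prioritize by type
--         critical_errors = [
--             e
--             for e in errors
--             if e.get("exception_type")
--             in ["SyntaxError", "ImportError", "ModuleNotFoundError"]
--         ]
--         other_errors = [e for e in errors if e not in critical_errors]
--         return critical_errors + other_errors
--
--     else:  # fixing, detailed
--         # Return all errors with full context
--         return errors
-- ===== SOURCE B (Python) =====
-- _CRITICAL = {"SyntaxError", "ImportError", "ModuleNotFoundError"}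
--
--
-- def filter_errors_by_mode(errors, mode="balanced"):
--     if mode == "minimal":
--         return [e for e in errors if e.get("severity", "error") in ("error", "critical")]
--     if mode == "balanced":
--         # stable sort: critical types (key 0) first in original order, rest after
--         return sorted(errors, key=lambda e: e.get("exception_type") not in _CRITICAL)
--     return errors
-- ===== Notes on version B (the rewrite author's own statement) =====
-- stated objective: idiomatic
-- what changed: The balanced branch's two filtered lists plus concatenation (with a quadratic 'e not in critical_errors' membership scan) is replaced by a single stable sort on a boolean key over a set of critical types; the minimal branch stays a comprehension and the else branch returns errors unchanged.
import Mathlib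
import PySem

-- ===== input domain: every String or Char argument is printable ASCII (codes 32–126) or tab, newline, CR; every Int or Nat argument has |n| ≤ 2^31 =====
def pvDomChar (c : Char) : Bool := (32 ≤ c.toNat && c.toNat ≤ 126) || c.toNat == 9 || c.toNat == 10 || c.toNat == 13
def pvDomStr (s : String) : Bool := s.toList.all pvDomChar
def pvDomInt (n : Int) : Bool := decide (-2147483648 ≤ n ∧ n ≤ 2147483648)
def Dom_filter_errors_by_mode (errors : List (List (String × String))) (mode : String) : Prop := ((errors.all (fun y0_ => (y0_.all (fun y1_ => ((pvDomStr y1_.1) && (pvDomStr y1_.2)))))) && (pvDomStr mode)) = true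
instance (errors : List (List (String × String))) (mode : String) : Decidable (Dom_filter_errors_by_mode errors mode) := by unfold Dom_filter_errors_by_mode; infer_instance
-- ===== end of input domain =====

-- B replaces the balanced branch's two filter passes + membership concatenation by one
-- stable sort on a boolean key (idiomatic; return value proved equal on all inputs).

-- shared helper: Python's e.get(k) on a str->str dict (first-match association-list lookup)
def pyGetStr (e : List (String × String)) (k : String) : Option String :=
  (PySem.Dict.mk e).get? k

-- ===== PORT A =====
def filter_errors_by_mode (errors : List (List (String × String))) (mode : String) : List (List (String × String)) :=
  if mode = "minimal" then
    -- [error for error in errors if error.get("severity", "error") in ["error", "critical"]]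
    errors.filter (fun error =>
      decide (((pyGetStr error "severity").getD "error") ∈ (["error", "critical"] : List String)))
  else if mode = "balanced" then
    -- critical_errors = [e for e in errors if e.get("exception_type") in [...]]
    let critical_errors := errors.filter (fun e =>
      decide (pyGetStr e "exception_type" ∈
        ([some "SyntaxError", some "ImportError", some "ModuleNotFoundError"] : List (Option String))))
    -- other_errors = [e for e in errors if e not in critical_errors]
    let other_errors := errors.filter (fun e => decide (e ∉ critical_errors))
    critical_errors ++ other_errors
  else
    errors

-- ===== PORT B =====
-- e.get("exception_type") not in _CRITICAL   (None is not in the set)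
def bNotCritical (e : List (String × String)) : Bool :=
  match pyGetStr e "exception_type" with
  | some s => !(decide (s ∈ PySem.Set.ofList ["SyntaxError", "ImportError", "ModuleNotFoundError"]))
  | none => true

def filter_errors_by_mode_alt (errors : List (List (String × String))) (mode : String) : List (List (String × String)) :=
  if mode = "minimal" then
    errors.filter (fun e =>
      decide (((pyGetStr e "severity").getD "error") ∈ (["error", "critical"] : List String)))
  else if mode = "balanced" then
    -- sorted(errors, key=lambda e: e.get("exception_type") not in _CRITICAL)  (bool key: False=0 < True=1)
    PySem.List.sorted errors (fun e => if bNotCritical e then (1 : Nat) else 0) false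
  else
    errors

-- ===== PRECONDITION & SPEC =====
def Spec_filter_errors_by_mode (errors : List (List (String × String))) (mode : String) (out : List (List (String × String))) : Prop := out = filter_errors_by_mode_alt errors mode
instance (errors : List (List (String × String))) (mode : String) (out : List (List (String × String))) : Decidable (Spec_filter_errors_by_mode errors mode out) := by unfold Spec_filter_errors_by_mode; infer_instance

-- ===== CLAIM (what is proved, stated in full; the proofs are below) =====
def Claim_equal_filter_errors_by_mode : Prop := ∀ (errors : List (List (String × String))) (mode : String), Dom_filter_errors_by_mode errors mode → Spec_filter_errors_by_mode errors mode (filter_errors_by_mode errors mode)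

-- ===== LEMMAS AND PROOFS =====

-- A's critical-type test and (the negation of) B's sort key agree on every dict
theorem critEq (e : List (String × String)) :
    decide (pyGetStr e "exception_type" ∈
      ([some "SyntaxError", some "ImportError", some "ModuleNotFoundError"] : List (Option String)))
    = !bNotCritical e := by
  cases h : pyGetStr e "exception_type" with
  | none => simp [bNotCritical, h]
  | some s => simp [bNotCritical, h, PySem.Set.mem_ofList]

-- inserting a key-0 element into zeros ++ ones puts it right after the zeros
theorem insertBy_zero {α : Type} (key : α → Nat) (x : α) (hx : key x = 0)
    (A B : List α) (hA : ∀ a ∈ A, key a = 0) (hB : ∀ b ∈ B, key b = 1) :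
    PySem.List.insertBy (fun a b => decide (key a < key b)) x (A ++ B) = A ++ x :: B := by
  induction A with
  | nil =>
    cases B with
    | nil => simp [PySem.List.insertBy]
    | cons b t =>
      have hb : key b = 1 := hB b (by simp)
      simp [PySem.List.insertBy, hx, hb]
  | cons a t ih =>
    have ha : key a = 0 := hA a (by simp)
    simp only [List.cons_append, PySem.List.insertBy, hx, ha]
    simp [ih (fun a ha' => hA a (by simp [ha']))]

-- inserting a key-1 element into a key-≤-1 list appends it at the end
theorem insertBy_one {α : Type} (key : α → Nat) (x : α) (hx : key x = 1)
    (L : List α) (hL : ∀ y ∈ L, key y ≤ 1) :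
    PySem.List.insertBy (fun a b => decide (key a < key b)) x L = L ++ [x] := by
  induction L with
  | nil => simp [PySem.List.insertBy]
  | cons y t ih =>
    have hy : ¬ key x < key y := by have := hL y (by simp); omega
    simp only [PySem.List.insertBy, decide_eq_true_eq]
    simp [hy, ih (fun z hz => hL z (by simp [hz]))]

-- the insertion-sort loop on a 0/1-valued key splits the list stably
theorem foldl_insertBy_split {α : Type} (key : α → Nat) (hk : ∀ e, key e ≤ 1)
    (xs : List α) : ∀ (A B : List α), (∀ a ∈ A, key a = 0) → (∀ b ∈ B, key b = 1) →
    xs.foldl (fun acc x => PySem.List.insertBy (fun a b => decide (key a < key b)) x acc) (A ++ B)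
    = (A ++ xs.filter (fun e => key e == 0)) ++ (B ++ xs.filter (fun e => !(key e == 0))) := by
  induction xs with
  | nil => intro A B _ _; simp
  | cons x t ih =>
    intro A B hA hB
    simp only [List.foldl_cons]
    rcases Nat.lt_or_ge (key x) 1 with hx | hx
    · have hx0 : key x = 0 := by omega
      rw [insertBy_zero key x hx0 A B hA hB]
      have : A ++ x :: B = (A ++ [x]) ++ B := by simp
      rw [this, ih (A ++ [x]) B
        (by intro a ha; rcases List.mem_append.1 ha with h | h
            · exact hA a h
            · simp at h; simp [h, hx0]) hB]
      simp [hx0]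
    · have hx1 : key x = 1 := by have := hk x; omega
      have hmix : ∀ y ∈ A ++ B, key y ≤ 1 := by
        intro y hy; rcases List.mem_append.1 hy with h | h
        · simp [hA y h]
        · simp [hB y h]
      rw [insertBy_one key x hx1 (A ++ B) hmix]
      have : (A ++ B) ++ [x] = A ++ (B ++ [x]) := by simp
      rw [this, ih A (B ++ [x]) hA
        (by intro b hb; rcases List.mem_append.1 hb with h | h
            · exact hB b h
            · simp at h; simp [h, hx1])]
      simp [hx1]

-- ===== VERDICT (by name: the statement is the Claim_ definition above) =====
theorem filter_errors_by_mode_spec : Claim_equal_filter_errors_by_mode := by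
  intro errors mode _
  unfold Spec_filter_errors_by_mode filter_errors_by_mode filter_errors_by_mode_alt
  by_cases hmin : mode = "minimal"
  · simp [hmin]
  · by_cases hbal : mode = "balanced"
    · simp only [hbal, if_true]
      set key : List (String × String) → Nat := fun e => if bNotCritical e then 1 else 0 with hkey
      have hk : ∀ e, key e ≤ 1 := by intro e; simp [hkey]; split <;> omega
      have hkey0 : ∀ e, (key e == 0) = !bNotCritical e := by
        intro e; simp [hkey]; cases bNotCritical e <;> simp
      have hsplit := foldl_insertBy_split key hk errors [] [] (by simp) (by simp)
      rw [PySem.List.sorted_eq_foldl_insertBy] at *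
      simp only [List.nil_append] at hsplit
      rw [hsplit]
      -- identify the two filters with A's critical/other lists
      have hcrit : errors.filter (fun e => key e == 0)
          = errors.filter (fun e =>
              decide (pyGetStr e "exception_type" ∈
                ([some "SyntaxError", some "ImportError", some "ModuleNotFoundError"] : List (Option String)))) := by
        apply List.filter_congr; intro e _; rw [critEq, hkey0]
      have hother : errors.filter (fun e => !(key e == 0))
          = errors.filter (fun e => decide (e ∉ errors.filter (fun e' =>
              decide (pyGetStr e' "exception_type" ∈
                ([some "SyntaxError", some "ImportError", some "ModuleNotFoundError"] : List (Option String)))))) := by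
        apply List.filter_congr; intro e he
        have : (e ∈ errors.filter (fun e' =>
            decide (pyGetStr e' "exception_type" ∈
              ([some "SyntaxError", some "ImportError", some "ModuleNotFoundError"] : List (Option String)))))
            ↔ (key e = 0) := by
          constructor
          · intro hm
            have := (List.mem_filter.1 hm).2
            have h2 : (key e == 0) = true := by rw [hkey0, ← critEq]; exact this
            simpa using h2
          · intro h0
            refine List.mem_filter.2 ⟨he, ?_⟩
            rw [critEq, ← hkey0]; simp [h0]
        have hbeq : (key e == 0) = decide (key e = 0) := by
          by_cases h0 : key e = 0 <;> simp [h0]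
        have hdec : decide (e ∈ errors.filter (fun e' =>
            decide (pyGetStr e' "exception_type" ∈
              ([some "SyntaxError", some "ImportError", some "ModuleNotFoundError"] : List (Option String)))))
            = (key e == 0) := by
          rw [hbeq]; exact decide_eq_decide.mpr this
        simp only [decide_not, hdec]
      rw [hcrit, hother]
    · simp [hmin, hbal]
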